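-- pv_equiv track=rewrite | github.com/pjourgensen/python-algos-practice | sets/no_idea.py | no_idea
-- ===== SOURCE A (Python) =====
-- def no_idea(arr,A,B):
--     happiness = 0
--     for entry in arr:
--         if entry in A:
--             happiness += 1
--         if entry in B:
--             happiness -= 1
--     return happiness
-- ===== SOURCE B (Python) =====
-- def _overlap(s, keys):
--     # s: sorted list (may have duplicates); keys: sorted strictly increasing.
--     # Two-pointer merge counting how many elements of s occur in keys.
--     i = j = total = 0
--     n, m = len(s), len(keys)
--     while i < n and j < m:
--         if s[i] < keys[j]:
--             i += 1
--         elif s[i] > keys[j]: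
--             j += 1
--         else:
--             total += 1
--             i += 1
--     return total
--
-- def no_idea(arr, A, B):
--     s = sorted(arr)
--     return _overlap(s, sorted(set(A))) - _overlap(s, sorted(set(B)))
-- ===== Notes on version B (the rewrite author's own statement) =====
-- stated objective: alternative
-- what changed: B is a sort-and-merge algorithm: it sorts arr and the deduplicated A and B, then counts overlaps with a two-pointer merge and returns the difference of the two overlap counts, instead of tallying +1/-1 per element with membership scans.
import Mathlib
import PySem

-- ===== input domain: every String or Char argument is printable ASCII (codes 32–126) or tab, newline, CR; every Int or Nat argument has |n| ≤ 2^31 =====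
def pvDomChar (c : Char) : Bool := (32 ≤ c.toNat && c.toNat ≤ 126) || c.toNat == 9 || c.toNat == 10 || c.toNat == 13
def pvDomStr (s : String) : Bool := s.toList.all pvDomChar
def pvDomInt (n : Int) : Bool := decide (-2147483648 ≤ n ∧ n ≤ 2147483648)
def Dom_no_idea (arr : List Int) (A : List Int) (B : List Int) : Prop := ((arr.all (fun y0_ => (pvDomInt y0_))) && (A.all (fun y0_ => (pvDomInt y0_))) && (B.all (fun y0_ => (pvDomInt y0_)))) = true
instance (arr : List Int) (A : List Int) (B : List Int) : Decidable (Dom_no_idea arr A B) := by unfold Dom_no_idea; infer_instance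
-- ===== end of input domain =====

-- B computes the same happiness by a different algorithm: sort arr and the deduplicated
-- A and B, count overlaps by a two-pointer merge, and return the difference of the counts.


-- ===== PORT A =====
def no_idea (arr : List Int) (A : List Int) (B : List Int) : Int :=
  arr.foldl (fun happiness entry =>
    let happiness := if A.contains entry then happiness + 1 else happiness
    if B.contains entry then happiness - 1 else happiness) 0

-- ===== PORT B =====
-- _overlap: two-pointer merge over the sorted list s and the sorted distinct keys
-- (the while loop of Source B, as structural recursion on the two lists it indexes into)
def pvOverlap : List Int → List Int → Int
  | [], _ => 0
  | _ :: _, [] => 0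
  | a :: s, k :: ks =>
    if a < k then pvOverlap s (k :: ks)
    else if a > k then pvOverlap (a :: s) ks
    else 1 + pvOverlap s (k :: ks)
termination_by s keys => s.length + keys.length

def no_idea_alt (arr : List Int) (A : List Int) (B : List Int) : Int :=
  let s := PySem.List.sorted arr (fun x => x) false
  pvOverlap s (PySem.List.sorted (PySem.Set.ofList A) (fun x => x) false)
    - pvOverlap s (PySem.List.sorted (PySem.Set.ofList B) (fun x => x) false)

-- ===== PRECONDITION & SPEC =====
def Spec_no_idea (arr : List Int) (A : List Int) (B : List Int) (out : Int) : Prop := out = no_idea_alt arr A B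
instance (arr : List Int) (A : List Int) (B : List Int) (out : Int) : Decidable (Spec_no_idea arr A B out) := by unfold Spec_no_idea; infer_instance

-- ===== CLAIM (what is proved, stated in full; the proofs are below) =====
def Claim_equal_no_idea : Prop := ∀ (arr : List Int) (A : List Int) (B : List Int), Dom_no_idea arr A B → Spec_no_idea arr A B (no_idea arr A B)

-- ===== LEMMAS AND PROOFS =====

-- A's loop is (count of arr-elements in A) − (count in B)
theorem foldlA_eq (A B : List Int) : ∀ (arr : List Int) (h : Int),
    arr.foldl (fun happiness entry =>
      let happiness := if A.contains entry then happiness + 1 else happiness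
      if B.contains entry then happiness - 1 else happiness) h
    = h + (arr.countP (fun x => decide (x ∈ A)) : Int)
        - (arr.countP (fun x => decide (x ∈ B)) : Int) := by
  intro arr
  induction arr with
  | nil => intro h; simp
  | cons a rest ih =>
    intro h
    simp only [List.foldl_cons, List.countP_cons, ih]
    by_cases hA : a ∈ A <;> by_cases hB : a ∈ B <;>
      simp [hA, hB] <;> omega

-- the merge counts exactly the elements of s that lie in keys
theorem overlap_eq : ∀ (s keys : List Int), s.Pairwise (· ≤ ·) → keys.Pairwise (· < ·) →
    pvOverlap s keys = (s.countP (fun x => decide (x ∈ keys)) : Int) := by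
  intro s keys
  induction s, keys using pvOverlap.induct with
  | case1 keys => intro _ _; simp [pvOverlap]
  | case2 a s => intro _ _; simp [pvOverlap]
  | case3 a s k ks hlt ih =>
    intro hs hk
    have hnot : a ∉ k :: ks := by
      intro hmem
      rcases List.mem_cons.mp hmem with rfl | hmem
      · exact absurd hlt (lt_irrefl _)
      · exact absurd (lt_trans hlt (List.rel_of_pairwise_cons hk hmem)) (lt_irrefl _)
    rw [pvOverlap, if_pos hlt]
    rw [ih (List.Pairwise.sublist (List.sublist_cons_self a s) hs) hk]
    have h1 : ¬a = k := fun he => hnot (he ▸ List.mem_cons_self)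
    have h2 : a ∉ ks := fun hm => hnot (List.mem_cons_of_mem _ hm)
    simp [h1, h2]
  | case4 a s k ks hnlt hgt ih =>
    intro hs hk
    rw [pvOverlap, if_neg hnlt, if_pos hgt]
    rw [ih hs (List.Pairwise.sublist (List.sublist_cons_self k ks) hk)]
    congr 1
    apply List.countP_congr
    intro x hx
    have hax : a ≤ x := by
      rcases List.mem_cons.mp hx with rfl | hx
      · exact le_refl x
      · exact List.rel_of_pairwise_cons hs hx
    have hxk : x ≠ k := fun he => absurd (lt_of_lt_of_le hgt hax) (by rw [he]; exact lt_irrefl k)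
    simp [List.mem_cons, hxk]
  | case5 a s k ks hnlt hngt ih =>
    intro hs hk
    have hak : a = k := le_antisymm (not_lt.mp hngt) (not_lt.mp hnlt)
    rw [pvOverlap, if_neg hnlt, if_neg hngt]
    rw [ih (List.Pairwise.sublist (List.sublist_cons_self a s) hs) hk]
    have hc : List.countP (fun x => decide (x ∈ k :: ks)) (a :: s)
        = List.countP (fun x => decide (x ∈ k :: ks)) s + 1 := by
      simp [hak]
    rw [hc]
    push_cast
    ring

-- one side of B = count of arr-elements in L
theorem overlap_side (arr L : List Int) :
    pvOverlap (PySem.List.sorted arr (fun x => x) false)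
      (PySem.List.sorted (PySem.Set.ofList L) (fun x => x) false)
    = (arr.countP (fun x => decide (x ∈ L)) : Int) := by
  set s := PySem.List.sorted arr (fun x => x) false with hsdef
  set kL := PySem.List.sorted (PySem.Set.ofList L) (fun x => x) false with hkdef
  have hs : s.Pairwise (· ≤ ·) := PySem.List.sorted_pairwise arr (fun x => x)
  have hk : kL.Pairwise (· < ·) := PySem.List.sorted_ofList_pairwise_lt L
  rw [overlap_eq s kL hs hk]
  congr 1
  have hmem : ∀ x, x ∈ kL ↔ x ∈ L := by
    intro x
    simp [hkdef, PySem.List.mem_sorted, PySem.Set.mem_ofList]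
  calc s.countP (fun x => decide (x ∈ kL))
      = s.countP (fun x => decide (x ∈ L)) :=
        List.countP_congr (fun x _ => by simp [hmem x])
    _ = arr.countP (fun x => decide (x ∈ L)) :=
        (PySem.List.sorted_perm arr (fun x => x) false).countP_eq _

-- ===== VERDICT (by name: the statement is the Claim_ definition above) =====
theorem no_idea_spec : Claim_equal_no_idea := by
  intro arr A B _
  unfold Spec_no_idea no_idea no_idea_alt
  rw [foldlA_eq]
  simp only [overlap_side arr A, overlap_side arr B]
  ring
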